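-- pv_equiv track=rewrite | github.com/rlaishra/link-prediction | measures.py | in_degree
-- ===== SOURCE A (Python) =====
-- def in_degree(adjacency_list, sample_nodes):
-- 	in_degree = {}
--
-- 	for n in sample_nodes:
-- 		in_degree[n] = 0
--
-- 	for x in adjacency_list:
-- 		for y in adjacency_list[x]:
-- 			if sample_nodes is None or y in sample_nodes:
-- 				in_degree[y] += 1
-- 	return in_degree
-- ===== SOURCE B (Python) =====
-- def in_degree(adjacency_list, sample_nodes):
-- 	# Materialise the flat list of all edge targets, then count each sampled
-- 	# node in it directly -- no mutable counter dict and no per-edge filter.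
-- 	edges = [y for targets in adjacency_list.values() for y in targets]
-- 	return {n: edges.count(n) for n in sample_nodes}
-- ===== Notes on version B (the rewrite author's own statement) =====
-- stated objective: simpler
-- what changed: B has no mutable counter at all: it flattens the adjacency values into one plain list of edge targets and answers each sampled node by list.count on that list, flipping the loop nesting (nodes outer, edges inner) and dropping both A's zero-init loop and its per-edge membership test.
import Mathlib
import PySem

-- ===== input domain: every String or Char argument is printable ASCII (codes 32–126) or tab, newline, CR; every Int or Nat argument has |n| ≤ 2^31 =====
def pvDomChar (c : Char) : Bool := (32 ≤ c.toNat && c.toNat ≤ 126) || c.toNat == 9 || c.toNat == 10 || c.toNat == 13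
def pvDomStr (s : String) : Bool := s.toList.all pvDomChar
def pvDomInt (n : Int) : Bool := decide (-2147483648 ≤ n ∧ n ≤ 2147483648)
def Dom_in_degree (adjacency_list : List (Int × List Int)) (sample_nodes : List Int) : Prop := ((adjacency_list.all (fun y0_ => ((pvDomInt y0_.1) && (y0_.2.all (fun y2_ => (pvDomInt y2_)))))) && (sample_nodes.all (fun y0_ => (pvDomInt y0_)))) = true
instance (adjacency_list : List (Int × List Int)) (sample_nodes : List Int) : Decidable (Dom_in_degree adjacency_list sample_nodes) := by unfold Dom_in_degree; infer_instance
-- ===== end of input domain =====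

-- B removes A's mutable counter dict and per-edge membership test: it flattens the
-- adjacency values into one edge-target list and counts each sampled node in it
-- (objective: simpler flatten-then-count decomposition).

-- ===== PORT A =====
-- A: init in_degree[n] = 0 for n in sample_nodes; then for each key x of the dict,
-- for each y in adjacency_list[x], if y in sample_nodes then in_degree[y] += 1.
-- (in_degree[y] += 1 only runs when y ∈ sample_nodes, hence y is already a key;
-- Dict.modify y 0 (· + 1) is exact there.)
def in_degree (adjacency_list : List (Int × List Int)) (sample_nodes : List Int) : List (Int × Int) :=
  let adj : PySem.Dict Int (List Int) := PySem.Dict.ofList adjacency_list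
  let d0 : PySem.Dict Int Int :=
    sample_nodes.foldl (fun d n => d.insert n 0) PySem.Dict.empty
  let d : PySem.Dict Int Int :=
    adj.keys.foldl (fun d x =>
      (adj.getD x []).foldl (fun d y =>
        if sample_nodes.contains y then d.modify y 0 (· + 1) else d) d) d0
  d.items

-- ===== PORT B =====
-- B: edges = [y for targets in adjacency_list.values() for y in targets];
-- then {n: edges.count(n) for n in sample_nodes}.
def in_degree_alt (adjacency_list : List (Int × List Int)) (sample_nodes : List Int) : List (Int × Int) :=
  let adj : PySem.Dict Int (List Int) := PySem.Dict.ofList adjacency_list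
  let edges : List Int := adj.values.flatMap (fun targets => targets)
  (sample_nodes.foldl (fun r n => r.insert n (PySem.List.count edges n)) PySem.Dict.empty).items

-- ===== PRECONDITION & SPEC =====
def Spec_in_degree (adjacency_list : List (Int × List Int)) (sample_nodes : List Int) (out : List (Int × Int)) : Prop := out = in_degree_alt adjacency_list sample_nodes
instance (adjacency_list : List (Int × List Int)) (sample_nodes : List Int) (out : List (Int × Int)) : Decidable (Spec_in_degree adjacency_list sample_nodes out) := by unfold Spec_in_degree; infer_instance

-- ===== CLAIM (what is proved, stated in full; the proofs are below) =====
def Claim_equal_in_degree : Prop := ∀ (adjacency_list : List (Int × List Int)) (sample_nodes : List Int), Dom_in_degree adjacency_list sample_nodes → Spec_in_degree adjacency_list sample_nodes (in_degree adjacency_list sample_nodes)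

-- ===== LEMMAS AND PROOFS =====

-- zero-init fold: keys are the distinct sample nodes, every stored value is 0
theorem pv_init_keys (sample : List Int) :
    (sample.foldl (fun d n => d.insert n 0) (PySem.Dict.empty : PySem.Dict Int Int)).keys
      = PySem.Set.ofList sample := by
  rw [PySem.Dict.keys_foldl_insert]
  simp [PySem.Dict.keys_empty, PySem.Set.update_nil_left]

theorem pv_init_getD (sample : List Int) (k : Int) :
    (sample.foldl (fun d n => d.insert n 0) (PySem.Dict.empty : PySem.Dict Int Int)).getD k 0 = 0 := by
  induction sample using List.reverseRecOn with
  | nil => simp [PySem.Dict.getD_empty]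
  | append_singleton xs x ih =>
    rw [List.foldl_append]
    simp only [List.foldl_cons, List.foldl_nil, PySem.Dict.getD_insert]
    split <;> simp [ih]

-- the counting fold touches only keys of sample, so keys never change …
theorem pv_countA_keys (sample : List Int) (T : List Int) (d : PySem.Dict Int Int)
    (h : ∀ y, sample.contains y → d.contains y) :
    (T.foldl (fun d y => if sample.contains y then d.modify y 0 (· + 1) else d) d).keys = d.keys := by
  induction T generalizing d with
  | nil => rfl
  | cons y T ih =>
    simp only [List.foldl_cons]
    by_cases hy : sample.contains y
    · rw [if_pos hy, ih]
      · rw [PySem.Dict.keys_modify]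
        simp [PySem.Dict.keys_insert_of_contains, h y hy]
      · intro z hz
        rw [PySem.Dict.contains_modify]
        simp [h z hz]
    · rw [if_neg hy]
      exact ih d h

-- … and adds the filtered count to each stored value
theorem pv_countA_getD (sample : List Int) (T : List Int) (d : PySem.Dict Int Int) (k : Int) :
    (T.foldl (fun d y => if sample.contains y then d.modify y 0 (· + 1) else d) d).getD k 0
      = d.getD k 0 + (T.filter (fun y => sample.contains y)).count k := by
  induction T generalizing d with
  | nil => simp
  | cons y T ih =>
    simp only [List.foldl_cons, List.filter_cons]
    by_cases hy : sample.contains y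
    · rw [if_pos hy, if_pos hy, ih, PySem.Dict.getD_modify, List.count_cons]
      by_cases hk : k = y
      · subst hk; simp; omega
      · simp [hk, Ne.symm hk]
    · rw [if_neg hy, if_neg hy, ih]

-- B's dict comprehension: keys are the distinct sample nodes, value at k is v k
theorem pv_proj_keys (sample : List Int) (v : Int → Int) :
    (sample.foldl (fun r n => r.insert n (v n)) (PySem.Dict.empty : PySem.Dict Int Int)).keys
      = PySem.Set.ofList sample := by
  rw [PySem.Dict.keys_foldl_insert]
  simp [PySem.Dict.keys_empty, PySem.Set.update_nil_left]

theorem pv_proj_getD (sample : List Int) (v : Int → Int) (k : Int) (hk : k ∈ sample) :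
    (sample.foldl (fun r n => r.insert n (v n)) (PySem.Dict.empty : PySem.Dict Int Int)).getD k 0 = v k := by
  induction sample using List.reverseRecOn with
  | nil => simp at hk
  | append_singleton xs x ih =>
    rw [List.foldl_append]
    simp only [List.foldl_cons, List.foldl_nil, PySem.Dict.getD_insert]
    rcases List.mem_append.mp hk with h | h
    · by_cases hkx : k = x
      · simp [hkx]
      · simp [hkx, ih h]
    · simp_all

-- A's outer loop over keys with getD lookups is the fold over the dict's values
theorem pv_keys_fold_eq_values_fold {β : Type} (adj : PySem.Dict Int (List Int))
    (hnd : adj.keys.Nodup) (g : β → List Int → β) (b : β) :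
    adj.keys.foldl (fun d x => g d (adj.getD x [])) b = adj.values.foldl g b := by
  rw [PySem.Dict.values_eq_map_keys adj hnd ([] : List Int), List.foldl_map]

-- ===== VERDICT (by name: the statement is the Claim_ definition above) =====
theorem in_degree_spec : Claim_equal_in_degree := by
  intro adjacency_list sample_nodes _
  unfold Spec_in_degree in_degree in_degree_alt
  simp only []
  set adj : PySem.Dict Int (List Int) := PySem.Dict.ofList adjacency_list with hadj
  set d0 : PySem.Dict Int Int :=
    sample_nodes.foldl (fun d n => d.insert n 0) PySem.Dict.empty with hd0
  have hndadj : adj.keys.Nodup := by rw [hadj]; exact PySem.Dict.nodup_keys_ofList _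
  rw [pv_keys_fold_eq_values_fold adj hndadj
    (fun d ys => ys.foldl (fun d y => if sample_nodes.contains y then d.modify y 0 (· + 1) else d) d) d0]
  rw [← List.foldl_flatten]
  set T : List Int := adj.values.flatten with hT
  set dA : PySem.Dict Int Int :=
    T.foldl (fun d y => if sample_nodes.contains y then d.modify y 0 (· + 1) else d) d0 with hdA
  set dB : PySem.Dict Int Int :=
    sample_nodes.foldl
      (fun r n => r.insert n (PySem.List.count (adj.values.flatMap (fun targets => targets)) n))
      PySem.Dict.empty with hdB
  -- both sides have key list = distinct sample nodes
  have hk0 : d0.keys = PySem.Set.ofList sample_nodes := pv_init_keys sample_nodes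
  have hkA : dA.keys = PySem.Set.ofList sample_nodes := by
    rw [hdA, pv_countA_keys, hk0]
    intro y hy
    rw [PySem.Dict.contains_iff_mem_keys, hk0, PySem.Set.mem_ofList]
    exact (List.contains_iff_mem).mp hy
  have hkB : dB.keys = PySem.Set.ofList sample_nodes := pv_proj_keys sample_nodes _
  have hndA : dA.keys.Nodup := by rw [hkA]; exact PySem.Set.nodup_ofList _
  have hndB : dB.keys.Nodup := by rw [hkB]; exact PySem.Set.nodup_ofList _
  rw [PySem.Dict.items_eq_map_keys dA hndA 0, PySem.Dict.items_eq_map_keys dB hndB 0, hkA, hkB]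
  refine List.map_congr_left (fun k hk => ?_)
  have hks : k ∈ sample_nodes := (PySem.Set.mem_ofList _ _).mp hk
  have hA : dA.getD k 0 = T.count k := by
    rw [hdA, pv_countA_getD, pv_init_getD]
    rw [List.count_filter]
    · simp
    · exact List.contains_iff_mem.mpr hks
  have hB : dB.getD k 0 = T.count k := by
    rw [hdB, pv_proj_getD sample_nodes _ k hks]
    simp [PySem.List.count, hT, List.flatMap_id']
  rw [hA, hB]
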